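-- pv_equiv track=rewrite | github.com/michaelshum/miscellaneous | advent-of-code/2025/day-3/gpt.py | max_joltage_for_bank
-- ===== SOURCE A (Python) =====
-- def max_joltage_for_bank(bank: str) -> int:
--     """
--     Given a string of digits like '987654321111111',
--     return the maximum possible two-digit joltage (keeping order).
--     """
--     bank = bank.strip()
--     # First digit is the only possible tens digit at the start
--     best_tens = int(bank[0])
--     best_pair = -1
--
--     # Walk through remaining digits as possible ones digits
--     for ch in bank[1:]:
--         d = int(ch)
--
--         # Use best tens digit seen so far with current ones digit
--         pair = 10 * best_tens + d
--         if pair > best_pair: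
--             best_pair = pair
--
--         # Update best tens digit if current digit is larger
--         if d > best_tens:
--             best_tens = d
--
--     return best_pair
-- ===== SOURCE B (Python) =====
-- def max_joltage_for_bank(bank: str) -> int:
--     """Brute force: try every ordered pair (tens digit, later ones digit)."""
--     digits = [int(ch) for ch in bank.strip()]
--     best = -1
--     for i in range(len(digits)):
--         for j in range(i + 1, len(digits)):
--             best = max(best, 10 * digits[i] + digits[j])
--     return best
-- ===== Notes on version B (the rewrite author's own statement) =====
-- stated objective: alternative
-- what changed: A's single pass with a running best-tens-digit accumulator is replaced by a brute-force nested double loop over every ordered pair of positions.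
-- crash fix: On input whose strip() is empty A raises IndexError at bank[0]; B's pair loop simply never runs and it returns -1. — e.g. on max_joltage_for_bank(" "): A raises IndexError, B returns -1
import Mathlib
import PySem

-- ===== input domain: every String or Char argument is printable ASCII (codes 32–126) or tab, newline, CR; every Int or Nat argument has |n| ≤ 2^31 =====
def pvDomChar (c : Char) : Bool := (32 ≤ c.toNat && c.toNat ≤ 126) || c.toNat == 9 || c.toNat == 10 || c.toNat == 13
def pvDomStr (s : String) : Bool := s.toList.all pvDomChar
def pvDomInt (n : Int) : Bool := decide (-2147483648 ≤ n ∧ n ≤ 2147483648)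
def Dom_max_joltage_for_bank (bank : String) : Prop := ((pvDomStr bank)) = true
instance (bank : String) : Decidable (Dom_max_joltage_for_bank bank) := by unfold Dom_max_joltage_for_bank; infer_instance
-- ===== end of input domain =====

-- B replaces A's single pass (running best tens digit) by a brute-force nested loop over all
-- ordered pairs of positions; same value wherever A returns, B additionally returns -1 where A
-- raises IndexError (empty stripped input).

-- ===== PORT A =====
def max_joltage_for_bank (bank : String) : Int :=
  let s := PySem.Chars.strip bank.toList
  -- int(bank[0]): under Pre_ s is nonempty and all digits, so neither getD default fires
  let bestTens : Int := (PySem.Int.ofChars? [PySem.List.pyGetD s 0 '0']).getD 0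
  let st := (PySem.List.slice s (some 1) none).foldl
      (fun (st : Int × Int) ch =>
        let d : Int := (PySem.Int.ofChars? [ch]).getD 0
        let bp := if 10 * st.1 + d > st.2 then 10 * st.1 + d else st.2
        let bt := if d > st.1 then d else st.1
        (bt, bp))
      (bestTens, -1)
  st.2

-- ===== PORT B =====
def max_joltage_for_bank_alt (bank : String) : Int :=
  let digits : List Int :=
    (PySem.Chars.strip bank.toList).map (fun ch => (PySem.Int.ofChars? [ch]).getD 0)
  let n : Int := digits.length
  (PySem.List.pyRange 0 n 1).foldl
    (fun best i =>
      (PySem.List.pyRange (i + 1) n 1).foldl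
        (fun b j =>
          max b (10 * PySem.List.pyGetD digits i 0 + PySem.List.pyGetD digits j 0))
        best)
    (-1)

-- ===== PRECONDITION & SPEC =====
-- Pre_ = exactly the inputs where Python A returns: the stripped string is nonempty (else
-- IndexError at bank[0]) and every remaining character is a digit (else int(ch) raises ValueError).
def Pre_max_joltage_for_bank (bank : String) : Prop :=
  PySem.Chars.strip bank.toList ≠ [] ∧
    PySem.Chars.strIsdigit (PySem.Chars.strip bank.toList) = true
instance (bank : String) : Decidable (Pre_max_joltage_for_bank bank) := by
  unfold Pre_max_joltage_for_bank; infer_instance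
def pvWitness_max_joltage_for_bank : String := "30215"

-- On input whose strip() is empty A raises IndexError at bank[0]; B's pair loop never runs and it returns -1.
def Raises_max_joltage_for_bank (bank : String) : Prop :=
  PySem.Chars.strip bank.toList = []
instance (bank : String) : Decidable (Raises_max_joltage_for_bank bank) := by
  unfold Raises_max_joltage_for_bank; infer_instance
def pvRaiseWitness_max_joltage_for_bank : String := "  "
def pvRaiseWitnessOut_max_joltage_for_bank : Int := -1

def Spec_max_joltage_for_bank (bank : String) (out : Int) : Prop :=
  out = max_joltage_for_bank_alt bank
instance (bank : String) (out : Int) : Decidable (Spec_max_joltage_for_bank bank out) := by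
  unfold Spec_max_joltage_for_bank; infer_instance

-- ===== CLAIM (what is proved, stated in full; the proofs are below) =====
def Claim_equal_max_joltage_for_bank : Prop :=
  ∀ (bank : String), Dom_max_joltage_for_bank bank → Pre_max_joltage_for_bank bank →
    Spec_max_joltage_for_bank bank (max_joltage_for_bank bank)

def Claim_raises_max_joltage_for_bank : Prop :=
  (∀ (bank : String), Dom_max_joltage_for_bank bank → Raises_max_joltage_for_bank bank →
      ¬ Pre_max_joltage_for_bank bank) ∧
    (Dom_max_joltage_for_bank (pvRaiseWitness_max_joltage_for_bank) ∧
      Raises_max_joltage_for_bank (pvRaiseWitness_max_joltage_for_bank) ∧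
      max_joltage_for_bank_alt (pvRaiseWitness_max_joltage_for_bank) =
        pvRaiseWitnessOut_max_joltage_for_bank)

-- ===== LEMMAS AND PROOFS =====

-- pvRow t ys p: fold of B's inner loop (all pairs with tens digit t, ones digits from ys) on best p
def pvRow (t : Int) (ys : List Int) (p : Int) : Int :=
  ys.foldl (fun b o => max b (10 * t + o)) p

-- pvBB: B's nested loops in structural form over the digit list
def pvBB : List Int → Int → Int
  | [], best => best
  | t :: rest, best => pvBB rest (pvRow t rest best)

theorem pvRow_cons (t x : Int) (ys : List Int) (p : Int) :
    pvRow t (x :: ys) p = pvRow t ys (max p (10 * t + x)) := rfl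

theorem pvRow_max (t : Int) (ys : List Int) (a b : Int) :
    pvRow t ys (max a b) = max (pvRow t ys a) b := by
  induction ys generalizing a with
  | nil => rfl
  | cons y ys ih =>
    rw [pvRow_cons, pvRow_cons]
    have h : max (max a b) (10 * t + y) = max (max a (10 * t + y)) b := by omega
    rw [h, ih]

theorem pvRow_split (t x : Int) (ys : List Int) (q : Int) :
    pvRow (max t x) ys q = pvRow x ys (pvRow t ys q) := by
  induction ys generalizing q with
  | nil => rfl
  | cons y ys ih =>
    rw [pvRow_cons, pvRow_cons, pvRow_cons]
    have h : max q (10 * max t x + y) = max (max q (10 * t + y)) (10 * x + y) := by omega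
    rw [h, ih, pvRow_max]

-- A's fold (the literal if-step over the remaining characters) equals B's structural
-- nested loops pvBB on the mapped digit list
theorem pvA_fold_chars (f : Char → Int) (cs : List Char) (t p : Int) :
    (cs.foldl (fun (st : Int × Int) ch =>
        ((if f ch > st.1 then f ch else st.1),
         (if 10 * st.1 + f ch > st.2 then 10 * st.1 + f ch else st.2))) (t, p)).2 =
      pvBB (t :: cs.map f) p := by
  induction cs generalizing t p with
  | nil => rfl
  | cons x ys ih =>
    rw [List.foldl_cons]
    have h1 : (if f x > t then f x else t) = max t (f x) := by split_ifs <;> omega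
    have h2 : (if 10 * t + f x > p then 10 * t + f x else p) = max p (10 * t + f x) := by
      split_ifs <;> omega
    rw [h1, h2, ih]
    show pvBB (ys.map f) (pvRow (max t (f x)) (ys.map f) (max p (10 * t + f x))) =
      pvBB (ys.map f) (pvRow (f x) (ys.map f) (pvRow t (f x :: ys.map f) p))
    rw [pvRow_cons, pvRow_split]

-- B's index double loop over pyRange equals pvBB on the dropped suffix
theorem pvB_range_eq (digits : List Int) (suffix : List Int) (k : Nat)
    (hk : digits.drop k = suffix) (best : Int) :
    (PySem.List.pyRange (k : Int) (digits.length : Int) 1).foldl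
        (fun best i =>
          (PySem.List.pyRange (i + 1) (digits.length : Int) 1).foldl
            (fun b j =>
              max b (10 * PySem.List.pyGetD digits i 0 + PySem.List.pyGetD digits j 0))
            best)
        best = pvBB suffix best := by
  induction suffix generalizing k best with
  | nil =>
    have hlen : digits.length ≤ k := List.drop_eq_nil_iff.mp hk
    rw [PySem.List.pyRange_one_eq_nil (by exact_mod_cast hlen)]
    rfl
  | cons t rest ih =>
    have hklt : k < digits.length := by
      by_contra h
      rw [List.drop_eq_nil_of_le (by omega)] at hk; cases hk
    have hget : digits[k]? = some t := by
      have h0 : (digits.drop k)[0]? = some t := by rw [hk]; rfl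
      rwa [List.getElem?_drop, Nat.add_zero] at h0
    have hrest : digits.drop (k + 1) = rest := by
      have : digits.drop (k + 1) = (digits.drop k).tail := by
        rw [List.tail_drop]
      rw [this, hk]; rfl
    rw [PySem.List.pyRange_one_cons (by exact_mod_cast hklt)]
    rw [List.foldl_cons]
    have hgetD : PySem.List.pyGetD digits (k : Int) 0 = t := by
      rw [PySem.List.pyGetD_natCast]
      simp [List.getD, hget]
    have hinner :
        (PySem.List.pyRange ((k : Int) + 1) (digits.length : Int) 1).foldl
            (fun b j =>
              max b (10 * PySem.List.pyGetD digits (k : Int) 0 + PySem.List.pyGetD digits j 0))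
            best = pvRow t rest best := by
      have hcast : ((k : Int) + 1) = ((k + 1 : Nat) : Int) := by push_cast; ring
      rw [hgetD, hcast,
        PySem.List.foldl_pyRange_pyGetD' digits 0 (fun b o => max b (10 * t + o)) best
          (by positivity)]
      simp [pvRow, hrest]
    rw [hinner]
    have hcast : ((k : Int) + 1) = ((k + 1 : Nat) : Int) := by push_cast; ring
    rw [hcast, ih (k + 1) hrest]
    rfl

-- ===== VERDICT (by name: the statement is the Claim_ definition above) =====
theorem max_joltage_for_bank_spec : Claim_equal_max_joltage_for_bank := by
  intro bank _ hpre
  obtain ⟨hne, _⟩ := hpre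
  unfold Spec_max_joltage_for_bank
  simp only [max_joltage_for_bank, max_joltage_for_bank_alt]
  generalize PySem.Chars.strip bank.toList = s at hne ⊢
  obtain ⟨c, cs, rfl⟩ := List.exists_cons_of_ne_nil hne
  simp only [PySem.List.pyGetD_zero_cons, PySem.List.slice_from_one, List.tail_cons,
    List.map_cons, List.length_cons, List.length_map]
  rw [pvA_fold_chars]
  have h := pvB_range_eq
    (((PySem.Int.ofChars? [c]).getD 0) :: cs.map (fun ch => (PySem.Int.ofChars? [ch]).getD 0))
    (((PySem.Int.ofChars? [c]).getD 0) :: cs.map (fun ch => (PySem.Int.ofChars? [ch]).getD 0))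
    0 rfl (-1)
  simp only [List.length_cons, List.length_map, Nat.cast_zero] at h
  exact h.symm

theorem max_joltage_for_bank_raises : Claim_raises_max_joltage_for_bank := by
  unfold Claim_raises_max_joltage_for_bank
  refine ⟨fun bank _ hr hp => hp.1 hr, by decide⟩

-- self-check: B's port really returns -1 at the raise witness (projection of the raises theorem)
theorem pvRaiseWitnessOut_ok :
    max_joltage_for_bank_alt pvRaiseWitness_max_joltage_for_bank =
      pvRaiseWitnessOut_max_joltage_for_bank :=
  max_joltage_for_bank_raises.2.2.2
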